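-- pv_equiv track=rewrite | github.com/FearTheDeer9/AmortizedBayesianOptimization | debugging-bc-training/analyze_accuracy_pattern.py | analyze_target_distribution
-- ===== SOURCE A (Python) =====
-- from collections import defaultdict
--
-- def analyze_target_distribution(labels):
--     """Analyze how often each variable appears as a target."""
--     target_counts = defaultdict(int)
--     total_by_scm_size = defaultdict(int)
--     targets_by_scm_size = defaultdict(lambda: defaultdict(int))
--
--     for label in labels:
--         variables = label.get('variables', [])
--         targets = list(label.get('targets', []))
--
--         if not targets:
--             continue
--
--         target_var = targets[0]
--         n_vars = len(variables)
--
--         target_counts[target_var] += 1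
--         total_by_scm_size[n_vars] += 1
--         targets_by_scm_size[n_vars][target_var] += 1
--
--     return target_counts, total_by_scm_size, targets_by_scm_size
-- ===== SOURCE B (Python) =====
-- from collections import defaultdict
--
-- def analyze_target_distribution(labels):
--     """Analyze how often each variable appears as a target."""
--     # Pass 1: extract the (scm_size, target_var) pair of every usable label.
--     pairs = []
--     for label in labels:
--         targets = list(label.get('targets', []))
--         if targets:
--             pairs.append((len(label.get('variables', [])), targets[0]))
--
--     # Pass 2: three independent aggregations over the pair list.
--     target_counts = defaultdict(int)
--     for _, target_var in pairs:
--         target_counts[target_var] += 1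
--
--     total_by_scm_size = defaultdict(int)
--     for n_vars, _ in pairs:
--         total_by_scm_size[n_vars] += 1
--
--     targets_by_scm_size = defaultdict(lambda: defaultdict(int))
--     for n_vars, target_var in pairs:
--         targets_by_scm_size[n_vars][target_var] += 1
--
--     return target_counts, total_by_scm_size, targets_by_scm_size
-- ===== Notes on version B (the rewrite author's own statement) =====
-- stated objective: alternative
-- what changed: A's single loop that updates all three dictionaries at once is split into a collect pass extracting the (scm_size, target) pair of each usable label followed by three independent aggregation loops over that pair list.
import Mathlib
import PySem

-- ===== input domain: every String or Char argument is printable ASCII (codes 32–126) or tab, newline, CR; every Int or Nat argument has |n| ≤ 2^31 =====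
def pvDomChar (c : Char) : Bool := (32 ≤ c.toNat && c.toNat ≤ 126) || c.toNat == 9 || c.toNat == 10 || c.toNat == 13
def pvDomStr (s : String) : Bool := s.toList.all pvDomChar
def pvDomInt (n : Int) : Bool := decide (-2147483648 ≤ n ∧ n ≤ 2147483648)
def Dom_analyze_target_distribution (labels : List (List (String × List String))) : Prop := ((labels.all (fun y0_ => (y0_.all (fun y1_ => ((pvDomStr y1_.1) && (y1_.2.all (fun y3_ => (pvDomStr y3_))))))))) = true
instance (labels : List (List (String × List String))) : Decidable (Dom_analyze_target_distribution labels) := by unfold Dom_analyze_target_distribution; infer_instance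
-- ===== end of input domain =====

-- B splits A's single three-dict loop into a pair-extraction pass plus three independent aggregation folds (alternative decomposition, same cost).


-- ===== PORT A =====
def analyze_target_distribution (labels : List (List (String × List String))) : (List (String × Int)) × (List (Int × Int)) × (List (Int × List (String × Int))) :=
  let st := labels.foldl (fun st label =>
    let varlist := PySem.Dict.getD (PySem.Dict.mk label) "variables" []
    let targets := PySem.Dict.getD (PySem.Dict.mk label) "targets" []
    match targets with
    | [] => st
    | target_var :: _ =>
      let n_vars : Int := (varlist.length : Int)
      (st.1.modify target_var 0 (· + 1),
       st.2.1.modify n_vars 0 (· + 1),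
       st.2.2.modify n_vars (PySem.Dict.empty : PySem.Dict String Int) (fun inner => inner.modify target_var 0 (· + 1))))
    (PySem.Dict.empty, PySem.Dict.empty, PySem.Dict.empty)
  (st.1.items, st.2.1.items, st.2.2.items.map (fun p => (p.1, p.2.items)))

-- ===== PORT B =====
def analyze_target_distribution_alt (labels : List (List (String × List String))) : (List (String × Int)) × (List (Int × Int)) × (List (Int × List (String × Int))) :=
  let pairs : List (Int × String) := labels.filterMap (fun label =>
    match PySem.Dict.getD (PySem.Dict.mk label) "targets" [] with
    | [] => none
    | t :: _ => some (((PySem.Dict.getD (PySem.Dict.mk label) "variables" []).length : Int), t))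
  let target_counts := pairs.foldl (fun d p => d.modify p.2 0 (· + 1)) PySem.Dict.empty
  let total_by_scm_size := pairs.foldl (fun d p => d.modify p.1 0 (· + 1)) PySem.Dict.empty
  let targets_by_scm_size := pairs.foldl (fun d p => d.modify p.1 (PySem.Dict.empty : PySem.Dict String Int) (fun inner => inner.modify p.2 0 (· + 1))) PySem.Dict.empty
  (target_counts.items, total_by_scm_size.items, targets_by_scm_size.items.map (fun p => (p.1, p.2.items)))

-- ===== PRECONDITION & SPEC =====
def Spec_analyze_target_distribution (labels : List (List (String × List String))) (out : (List (String × Int)) × (List (Int × Int)) × (List (Int × List (String × Int)))) : Prop := out = analyze_target_distribution_alt labels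
instance (labels : List (List (String × List String))) (out : (List (String × Int)) × (List (Int × Int)) × (List (Int × List (String × Int)))) : Decidable (Spec_analyze_target_distribution labels out) := by unfold Spec_analyze_target_distribution; infer_instance

-- ===== CLAIM (what is proved, stated in full; the proofs are below) =====
def Claim_equal_analyze_target_distribution : Prop := ∀ (labels : List (List (String × List String))), Dom_analyze_target_distribution labels → Spec_analyze_target_distribution labels (analyze_target_distribution labels)

-- ===== LEMMAS AND PROOFS =====
lemma pv_fission (labels : List (List (String × List String)))
    (a : PySem.Dict String Int) (b : PySem.Dict Int Int) (c : PySem.Dict Int (PySem.Dict String Int)) :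
    labels.foldl (fun st label =>
      let varlist := PySem.Dict.getD (PySem.Dict.mk label) "variables" []
      let targets := PySem.Dict.getD (PySem.Dict.mk label) "targets" []
      match targets with
      | [] => st
      | target_var :: _ =>
        let n_vars : Int := (varlist.length : Int)
        (st.1.modify target_var 0 (· + 1),
         st.2.1.modify n_vars 0 (· + 1),
         st.2.2.modify n_vars (PySem.Dict.empty : PySem.Dict String Int) (fun inner => inner.modify target_var 0 (· + 1))))
      (a, b, c)
    = (let pairs := labels.filterMap (fun label =>
        match PySem.Dict.getD (PySem.Dict.mk label) "targets" [] with
        | [] => none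
        | t :: _ => some (((PySem.Dict.getD (PySem.Dict.mk label) "variables" []).length : Int), t));
       (pairs.foldl (fun d p => d.modify p.2 0 (· + 1)) a,
        pairs.foldl (fun d p => d.modify p.1 0 (· + 1)) b,
        pairs.foldl (fun d p => d.modify p.1 (PySem.Dict.empty : PySem.Dict String Int) (fun inner => inner.modify p.2 0 (· + 1))) c)) := by
  induction labels generalizing a b c with
  | nil => rfl
  | cons label rest ih =>
    simp only [List.foldl_cons, List.filterMap_cons]
    cases h : PySem.Dict.getD (PySem.Dict.mk label) "targets" ([] : List String) with
    | nil => simpa [h] using ih a b c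
    | cons t ts => simpa [h] using ih _ _ _

-- ===== VERDICT (by name: the statement is the Claim_ definition above) =====
theorem analyze_target_distribution_spec : Claim_equal_analyze_target_distribution := by
  intro labels _
  unfold Spec_analyze_target_distribution analyze_target_distribution analyze_target_distribution_alt
  rw [pv_fission]
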